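-- pv_equiv track=rewrite | github.com/toku463ne/cld_trade_advisor | scripts/extract_sign_docs.py | _docstring_to_md
-- ===== SOURCE A (Python) =====
-- def _docstring_to_md(doc_body: str) -> str:
--     """Body of the module docstring → markdown.
--
--     Heuristic: a line that ends with a colon and is followed by indented
--     bullets becomes an `## H2`. Indented `- foo` stays as `- foo`. Otherwise
--     pass through with normalised whitespace.
--     """
--     lines = doc_body.splitlines()
--     out: list[str] = []
--     for line in lines:
--         stripped = line.strip()
--         # Indented bullet → dedent
--         if stripped.startswith("- "):
--             out.append(stripped)
--         else:
--             out.append(stripped)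
--     # collapse runs of blank lines
--     md: list[str] = []
--     blank = False
--     for line in out:
--         if line == "":
--             if not blank:
--                 md.append("")
--             blank = True
--         else:
--             md.append(line)
--             blank = False
--     return "\n".join(md).strip() + "\n"
-- ===== SOURCE B (Python) =====
-- def _docstring_to_md(doc_body: str) -> str:
--     stripped = [ln.strip() for ln in doc_body.splitlines()]
--     if stripped:
--         md = [stripped[0]] + [ln for prev, ln in zip(stripped, stripped[1:]) if ln or prev]
--     else:
--         md = []
--     return "\n".join(md).strip() + "\n"
-- ===== Notes on version B (the rewrite author's own statement) =====
-- stated objective: simpler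
-- what changed: The stateful two-loop blank-flag machine (with a dead if whose branches are identical) becomes one pass: strip the lines, then keep a line iff it or its predecessor (zip with the shifted list) is non-blank.
import Mathlib
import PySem

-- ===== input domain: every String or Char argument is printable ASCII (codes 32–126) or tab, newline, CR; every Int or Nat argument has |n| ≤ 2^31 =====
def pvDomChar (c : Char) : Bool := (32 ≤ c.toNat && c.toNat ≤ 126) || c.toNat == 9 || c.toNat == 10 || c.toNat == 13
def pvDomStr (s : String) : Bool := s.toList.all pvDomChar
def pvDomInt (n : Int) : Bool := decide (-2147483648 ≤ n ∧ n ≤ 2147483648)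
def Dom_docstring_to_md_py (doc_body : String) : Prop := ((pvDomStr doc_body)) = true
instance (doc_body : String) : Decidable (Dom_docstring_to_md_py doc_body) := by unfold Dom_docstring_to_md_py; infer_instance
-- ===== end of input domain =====

-- B replaces A's two passes (strip loop, then a blank-flag state machine collapsing blank runs)
-- by a single pairwise comprehension over zip(stripped, stripped[1:]): simpler, no carried state.

-- ===== PORT A =====
-- literal transliteration of _docstring_to_md: first loop builds `out` (both branches of
-- the if append the stripped line, as in the source), second loop carries (md, blank).
def docstring_to_md_py (doc_body : String) : String :=
  let lines := PySem.Str.splitlines doc_body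
  let out : List String :=
    lines.foldl (fun out line =>
      let stripped := PySem.Str.strip line
      if PySem.Str.startswith stripped "- " then out ++ [stripped]
      else out ++ [stripped]) []
  let st : List String × Bool :=
    out.foldl (fun (st : List String × Bool) line =>
      if line = "" then
        (if st.2 = false then (st.1 ++ [""], true) else (st.1, true))
      else (st.1 ++ [line], false)) ([], false)
  PySem.Str.strip (PySem.Str.join "\n" st.1) ++ "\n"

-- ===== PORT B =====
-- literal transliteration of Source B: strip each line, keep a line iff it is non-blank or its
-- predecessor (via zip with the one-shifted list) is non-blank; first line always kept.
def docstring_to_md_py_alt (doc_body : String) : String :=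
  let stripped := (PySem.Str.splitlines doc_body).map PySem.Str.strip
  let md : List String :=
    match stripped with
    | [] => []
    | h :: rest =>
        h :: (stripped.zip rest).filterMap
          (fun pl => if pl.2 ≠ "" ∨ pl.1 ≠ "" then some pl.2 else none)
  PySem.Str.strip (PySem.Str.join "\n" md) ++ "\n"

-- ===== PRECONDITION & SPEC =====
def Spec_docstring_to_md_py (doc_body : String) (out : String) : Prop := out = docstring_to_md_py_alt doc_body
instance (doc_body : String) (out : String) : Decidable (Spec_docstring_to_md_py doc_body out) := by unfold Spec_docstring_to_md_py; infer_instance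

-- ===== CLAIM (what is proved, stated in full; the proofs are below) =====
def Claim_equal_docstring_to_md_py : Prop := ∀ (doc_body : String), Dom_docstring_to_md_py doc_body → Spec_docstring_to_md_py doc_body (docstring_to_md_py doc_body)

-- ===== LEMMAS AND PROOFS =====

-- the blank-run collapse, written as a structural recursion on the line list
def pvColl (b : Bool) : List String → List String
  | [] => []
  | x :: t => if x = "" then (if b then pvColl true t else "" :: pvColl true t)
              else x :: pvColl false t

-- A's first loop is just `map strip` (the dead if has identical branches)
theorem pvOut_eq_map (lines : List String) (acc : List String) :
    lines.foldl (fun out line =>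
      let stripped := PySem.Str.strip line
      if PySem.Str.startswith stripped "- " then out ++ [stripped]
      else out ++ [stripped]) acc = acc ++ lines.map PySem.Str.strip := by
  induction lines generalizing acc with
  | nil => simp
  | cons x t ih =>
    rw [List.foldl_cons, ih]
    simp

-- A's second loop computes pvColl
theorem pvFold_eq_coll (xs : List String) (md : List String) (b : Bool) :
    (xs.foldl (fun (st : List String × Bool) line =>
      if line = "" then
        (if st.2 = false then (st.1 ++ [""], true) else (st.1, true))
      else (st.1 ++ [line], false)) (md, b)).1 = md ++ pvColl b xs := by
  induction xs generalizing md b with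
  | nil => simp [pvColl]
  | cons x t ih =>
    by_cases hx : x = ""
    · subst hx
      cases b with
      | false => simp [pvColl, List.foldl_cons, ih, List.append_assoc]
      | true => simp [pvColl, List.foldl_cons, ih]
    · simp [pvColl, hx, List.foldl_cons, ih, List.append_assoc]

-- pvColl seeded by "was the previous line blank?" is B's pairwise filter
theorem pvColl_eq_zip (p : String) (t : List String) :
    pvColl (decide (p = "")) t =
      ((p :: t).zip t).filterMap
        (fun pl => if pl.2 ≠ "" ∨ pl.1 ≠ "" then some pl.2 else none) := by
  induction t generalizing p with
  | nil => simp [pvColl]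
  | cons x t' ih =>
    by_cases hx : x = ""
    · subst hx
      by_cases hp : p = ""
      · simp [pvColl, hp, List.zip_cons_cons, ← ih]
      · simp [pvColl, hp, List.zip_cons_cons, ← ih]
    · by_cases hp : p = "" <;>
        simp [pvColl, hx, hp, List.zip_cons_cons, ← ih]

theorem pvColl_false_cons (h : String) (rest : List String) :
    pvColl false (h :: rest) = h :: pvColl (decide (h = "")) rest := by
  by_cases hh : h = "" <;> simp [pvColl, hh]

-- ===== VERDICT (by name: the statement is the Claim_ definition above) =====
theorem docstring_to_md_py_spec : Claim_equal_docstring_to_md_py := by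
  intro doc_body _
  unfold Spec_docstring_to_md_py docstring_to_md_py docstring_to_md_py_alt
  simp only [pvOut_eq_map, pvFold_eq_coll, List.nil_append]
  cases hs : (PySem.Str.splitlines doc_body).map PySem.Str.strip with
  | nil => simp [pvColl]
  | cons h rest => rw [pvColl_false_cons, pvColl_eq_zip]
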